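-- pv_equiv track=rewrite | github.com/nico-fernandez/parser-py | Terminals/NUMBER.py | NUMBER_automata
-- ===== SOURCE A (Python) =====
-- TRAP_STATE = -1
--
-- RESULT_TRAP = "RESULT_TRAP"
--
-- RESULT_ACCEPTED = "ACCEPTED"
--
-- RESULT_NOT_ACCEPTED = "NOT ACCEPTED"
--
-- digits = ["0", "1", "2", "3", "4", "5", "6", "7", "8", "9"]
--
-- def NUMBER_delta(state, character):
--     if state == 0 and character in digits:
--         return 1
--     if state == 1 and character in digits:
--         return 1
--     if state == 1 and character == ".":
--         return 2
--     if state == 2 and character in digits: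
--         return 3
--     if state == 3 and character in digits:
--         return 3
--     return TRAP_STATE
--
-- def NUMBER_automata(string):
--     finals = [1, 3]
--     state = 0
--
--     for character in string:
--         next_state = NUMBER_delta(state, character)
--         state = next_state
--
--     if state in finals:
--         return RESULT_ACCEPTED
--     if state == TRAP_STATE:
--         return RESULT_TRAP
--     return RESULT_NOT_ACCEPTED
-- ===== SOURCE B (Python) =====
-- TRAP_STATE = -1
--
-- RESULT_TRAP = "RESULT_TRAP"
--
-- RESULT_ACCEPTED = "ACCEPTED"
--
-- RESULT_NOT_ACCEPTED = "NOT ACCEPTED"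
--
-- digits = ["0", "1", "2", "3", "4", "5", "6", "7", "8", "9"]
--
-- def NUMBER_automata(string):
--     # structural parse instead of DFA simulation
--     if string == "":
--         return RESULT_NOT_ACCEPTED
--     left, dot, right = string.partition(".")
--     if not dot:
--         return RESULT_ACCEPTED if all(c in digits for c in string) else RESULT_TRAP
--     if "." in right:
--         return RESULT_TRAP
--     if left == "" or not all(c in digits for c in left):
--         return RESULT_TRAP
--     if right == "":
--         return RESULT_NOT_ACCEPTED
--     return RESULT_ACCEPTED if all(c in digits for c in right) else RESULT_TRAP
-- ===== Notes on version B (the rewrite author's own statement) =====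
-- stated objective: simpler
-- what changed: Replaced the per-character DFA transition-function simulation with a structural parse: partition the string at the first dot and classify each part by digit membership.
import Mathlib
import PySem

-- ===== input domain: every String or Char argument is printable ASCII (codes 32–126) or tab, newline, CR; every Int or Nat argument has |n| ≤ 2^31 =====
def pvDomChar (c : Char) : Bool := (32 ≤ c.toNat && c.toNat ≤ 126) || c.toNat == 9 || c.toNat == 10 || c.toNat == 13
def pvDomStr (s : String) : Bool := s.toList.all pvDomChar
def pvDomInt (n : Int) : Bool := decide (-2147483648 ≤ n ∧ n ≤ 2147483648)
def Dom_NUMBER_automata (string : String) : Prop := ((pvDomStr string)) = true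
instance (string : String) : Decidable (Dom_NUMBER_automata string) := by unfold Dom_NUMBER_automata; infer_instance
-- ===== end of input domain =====

-- B replaces the DFA simulation by a structural parse (partition at the first '.'); objective: simpler.

-- ===== PORT A =====
def pvDigits : List Char := ['0','1','2','3','4','5','6','7','8','9']

def NUMBER_delta (state : Int) (character : Char) : Int :=
  if state = 0 ∧ pvDigits.contains character then 1
  else if state = 1 ∧ pvDigits.contains character then 1
  else if state = 1 ∧ character = '.' then 2
  else if state = 2 ∧ pvDigits.contains character then 3
  else if state = 3 ∧ pvDigits.contains character then 3
  else -1

def NUMBER_automata (string : String) : String :=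
  let finals : List Int := [1, 3]
  let state := string.toList.foldl NUMBER_delta 0
  if finals.contains state then "ACCEPTED"
  else if state = -1 then "RESULT_TRAP"
  else "NOT ACCEPTED"

-- ===== PORT B =====
def pvAllDigits (cs : List Char) : Bool := cs.all (fun c => pvDigits.contains c)

-- port of str.partition(".") over the char list: (before, found?, after)
def pvPartitionDot : List Char → List Char × Bool × List Char
  | [] => ([], false, [])
  | c :: t =>
    if c = '.' then ([], true, t)
    else
      let (l, f, r) := pvPartitionDot t
      (c :: l, f, r)

def NUMBER_automata_alt (string : String) : String :=
  let cs := string.toList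
  if cs = [] then "NOT ACCEPTED"
  else
    let (left, dot, right) := pvPartitionDot cs
    if !dot then (if pvAllDigits cs then "ACCEPTED" else "RESULT_TRAP")
    else if right.contains '.' then "RESULT_TRAP"
    else if left = [] ∨ ¬ pvAllDigits left then "RESULT_TRAP"
    else if right = [] then "NOT ACCEPTED"
    else if pvAllDigits right then "ACCEPTED" else "RESULT_TRAP"

-- ===== PRECONDITION & SPEC =====
def Spec_NUMBER_automata (string : String) (out : String) : Prop := out = NUMBER_automata_alt string
instance (string : String) (out : String) : Decidable (Spec_NUMBER_automata string out) := by unfold Spec_NUMBER_automata; infer_instance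

-- ===== CLAIM (what is proved, stated in full; the proofs are below) =====
def Claim_equal_NUMBER_automata : Prop := ∀ (string : String), Dom_NUMBER_automata string → Spec_NUMBER_automata string (NUMBER_automata string)

-- ===== LEMMAS AND PROOFS =====

theorem delta_trap (c : Char) : NUMBER_delta (-1) c = -1 := by
  simp [NUMBER_delta]

theorem delta3_digit (c : Char) (h : pvDigits.contains c = true) :
    NUMBER_delta 3 c = 3 := by
  have h' : c ∈ pvDigits := by simpa using h
  simp [NUMBER_delta, h']

theorem delta3_non (c : Char) (h : pvDigits.contains c = false) :
    NUMBER_delta 3 c = -1 := by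
  have h' : c ∉ pvDigits := by simpa using h
  simp [NUMBER_delta, h']

theorem delta2_digit (c : Char) (h : pvDigits.contains c = true) :
    NUMBER_delta 2 c = 3 := by
  have h' : c ∈ pvDigits := by simpa using h
  simp [NUMBER_delta, h']

theorem delta2_non (c : Char) (h : pvDigits.contains c = false) :
    NUMBER_delta 2 c = -1 := by
  have h' : c ∉ pvDigits := by simpa using h
  simp [NUMBER_delta, h']

theorem delta1_digit (c : Char) (h : pvDigits.contains c = true) :
    NUMBER_delta 1 c = 1 := by
  have h' : c ∈ pvDigits := by simpa using h
  simp [NUMBER_delta, h']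

theorem delta1_dot : NUMBER_delta 1 '.' = 2 := by
  decide

theorem delta1_other (c : Char) (h : pvDigits.contains c = false) (hd : c ≠ '.') :
    NUMBER_delta 1 c = -1 := by
  have h' : c ∉ pvDigits := by simpa using h
  simp [NUMBER_delta, h', hd]

theorem delta0_digit (c : Char) (h : pvDigits.contains c = true) :
    NUMBER_delta 0 c = 1 := by
  have h' : c ∈ pvDigits := by simpa using h
  simp [NUMBER_delta, h']

theorem delta0_non (c : Char) (h : pvDigits.contains c = false) :
    NUMBER_delta 0 c = -1 := by
  have h' : c ∉ pvDigits := by simpa using h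
  simp [NUMBER_delta, h']

theorem allDigits_cons (c : Char) (t : List Char) :
    pvAllDigits (c :: t) = (pvDigits.contains c && pvAllDigits t) := rfl

theorem run_trap (cs : List Char) : cs.foldl NUMBER_delta (-1) = -1 := by
  induction cs with
  | nil => rfl
  | cons c t ih => rw [List.foldl_cons, delta_trap]; exact ih

theorem run_three (cs : List Char) :
    cs.foldl NUMBER_delta 3 = (if pvAllDigits cs then 3 else -1) := by
  induction cs with
  | nil => rfl
  | cons c t ih =>
    cases h : pvDigits.contains c with
    | true => rw [List.foldl_cons, delta3_digit c h, ih, allDigits_cons, h]; simp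
    | false => rw [List.foldl_cons, delta3_non c h, run_trap, allDigits_cons, h]; simp

theorem run_two (cs : List Char) :
    cs.foldl NUMBER_delta 2 =
      (if cs = [] then 2 else if pvAllDigits cs then 3 else -1) := by
  cases cs with
  | nil => rfl
  | cons c t =>
    cases h : pvDigits.contains c with
    | true =>
      rw [List.foldl_cons, delta2_digit c h, run_three, allDigits_cons, h]
      simp
    | false =>
      rw [List.foldl_cons, delta2_non c h, run_trap, allDigits_cons, h]
      simp

theorem run_one (cs l : List Char) (f : Bool) (r : List Char)
    (hp : pvPartitionDot cs = (l, f, r)) :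
    cs.foldl NUMBER_delta 1 =
      (if f = false then (if pvAllDigits cs then 1 else -1)
       else if pvAllDigits l then r.foldl NUMBER_delta 2 else -1) := by
  induction cs generalizing l f r with
  | nil =>
    have hp2 : (([], false, []) : List Char × Bool × List Char) = (l, f, r) := by
      rw [← hp]; simp [pvPartitionDot]
    injection hp2 with h1 h23
    injection h23 with h2 h3
    subst h1; subst h2; subst h3
    rfl
  | cons c t ih =>
    by_cases hdot : c = '.'
    · subst hdot
      have hp2 : (([], true, t) : List Char × Bool × List Char) = (l, f, r) := by
        rw [← hp]; simp [pvPartitionDot]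
      injection hp2 with h1 h23
      injection h23 with h2 h3
      subst h1; subst h2; subst h3
      rw [List.foldl_cons, delta1_dot]
      simp [pvAllDigits]
    · rcases hpt : pvPartitionDot t with ⟨l', f', r'⟩
      have hstep : pvPartitionDot (c :: t) = (c :: l', f', r') := by
        simp [pvPartitionDot, hdot, hpt]
      rw [hstep] at hp
      injection hp with h1 h23
      injection h23 with h2 h3
      subst h1; subst h2; subst h3
      cases h : pvDigits.contains c with
      | true =>
        rw [List.foldl_cons, delta1_digit c h, ih l' f' r' hpt,
            allDigits_cons c t, allDigits_cons c l', h]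
        simp
      | false =>
        rw [List.foldl_cons, delta1_other c h hdot, run_trap,
            allDigits_cons c t, allDigits_cons c l', h]
        simp

theorem run_zero (cs l : List Char) (f : Bool) (r : List Char)
    (hp : pvPartitionDot cs = (l, f, r)) :
    cs.foldl NUMBER_delta 0 =
      (if cs = [] then 0
       else if f = false then (if pvAllDigits cs then 1 else -1)
       else if l = [] then -1
       else if pvAllDigits l then r.foldl NUMBER_delta 2 else -1) := by
  cases cs with
  | nil => rfl
  | cons c t =>
    by_cases hdot : c = '.'
    · subst hdot
      have hp2 : (([], true, t) : List Char × Bool × List Char) = (l, f, r) := by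
        rw [← hp]; simp [pvPartitionDot]
      injection hp2 with h1 h23
      injection h23 with h2 h3
      subst h1; subst h2; subst h3
      rw [List.foldl_cons, delta0_non '.' (by decide), run_trap]
      simp
    · rcases hpt : pvPartitionDot t with ⟨l', f', r'⟩
      have hstep : pvPartitionDot (c :: t) = (c :: l', f', r') := by
        simp [pvPartitionDot, hdot, hpt]
      rw [hstep] at hp
      injection hp with h1 h23
      injection h23 with h2 h3
      subst h1; subst h2; subst h3
      cases h : pvDigits.contains c with
      | true =>
        rw [List.foldl_cons, delta0_digit c h, run_one t l' f' r' hpt,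
            allDigits_cons c t, allDigits_cons c l', h]
        simp
      | false =>
        rw [List.foldl_cons, delta0_non c h, run_trap,
            allDigits_cons c t, allDigits_cons c l', h]
        simp

theorem dot_not_all_digits (r : List Char) (h : r.contains '.' = true) :
    pvAllDigits r = false := by
  have hm : '.' ∈ r := by simpa using h
  by_contra hfalse
  have htrue : pvAllDigits r = true := by simpa using hfalse
  simp only [pvAllDigits, List.all_eq_true] at htrue
  have := htrue '.' hm
  exact absurd this (by decide)

theorem contains_ne_nil (r : List Char) (h : r.contains '.' = true) : r ≠ [] := by
  intro he; subst he; simp at h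

-- ===== VERDICT (by name: the statement is the Claim_ definition above) =====
theorem NUMBER_automata_spec : Claim_equal_NUMBER_automata := by
  intro string _
  rcases hp : pvPartitionDot string.toList with ⟨l, f, r⟩
  simp only [Spec_NUMBER_automata, NUMBER_automata, NUMBER_automata_alt,
    run_zero string.toList l f r hp, hp]
  by_cases hnil : string.toList = []
  · simp [hnil]
  · cases f with
    | false =>
      by_cases hall : pvAllDigits string.toList = true
      · simp [hnil, hall]
      · simp [hnil, hall]
    | true =>
      by_cases hl : l = []
      · by_cases hrc : r.contains '.' = true
        · simp [hnil, hl, hrc]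
        · simp [hnil, hl, hrc]
      · by_cases hld : pvAllDigits l = true
        · by_cases hrc : r.contains '.' = true
          · simp [hnil, hl, hld, hrc, run_two,
              contains_ne_nil r hrc, dot_not_all_digits r hrc]
          · have hnr : '.' ∉ r := by simpa using hrc
            by_cases hr : r = []
            · simp [hnil, hl, hld, hnr, hr, run_two]
            · by_cases hrd : pvAllDigits r = true
              · simp [hnil, hl, hld, hnr, hr, hrd, run_two]
              · simp [hnil, hl, hld, hnr, hr, hrd, run_two]
        · by_cases hrc : r.contains '.' = true
          · simp [hnil, hl, hld, hrc]
          · simp [hnil, hl, hld, hrc]
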